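-- pv_equiv track=rewrite | github.com/sonjamichelle/VergeGrid | generate_changelog_clean.py | summarize_release
-- ===== SOURCE A (Python) =====
-- def summarize_release(sections):
--     """Generate a short build summary sentence based on section content."""
--     counts = {k: len(v) for k, v in sections.items() if v}
--     if not counts:
--         return "Maintenance-only release."
--     top = sorted(counts.items(), key=lambda x: x[1], reverse=True)
--     main = [s for s, _ in top[:2]]
--     summary_map = {
--         "Added": "Introduces new features and functionality",
--         "Fixed": "Fixes key issues and improves reliability",
--         "Improved": "Enhances performance and user experience",
--         "Internal": "Internal cleanup and dependency updates",
--         "Other": "Minor maintenance and adjustments",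
--     }
--     if len(main) == 1:
--         phrase = summary_map.get(main[0], "General improvements")
--     else:
--         phrase = f"{summary_map.get(main[0], '')}; also includes {summary_map.get(main[1], '').lower()}"
--     return phrase.rstrip(".") + "."
-- ===== SOURCE B (Python) =====
-- def summarize_release(sections):
--     """Generate a short build summary sentence based on section content.
--
--     Single linear pass tracking the top-two nonempty sections (stable, strict '>')
--     instead of building a counts dict and sorting it."""
--     best = None
--     second = None
--     for k, v in sections.items():
--         if not v:
--             continue
--         n = len(v)
--         if best is None or n > best[1]:
--             best, second = (k, n), best
--         elif second is None or n > second[1]: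
--             second = (k, n)
--     if best is None:
--         return "Maintenance-only release."
--     summary_map = {
--         "Added": "Introduces new features and functionality",
--         "Fixed": "Fixes key issues and improves reliability",
--         "Improved": "Enhances performance and user experience",
--         "Internal": "Internal cleanup and dependency updates",
--         "Other": "Minor maintenance and adjustments",
--     }
--     if second is None:
--         phrase = summary_map.get(best[0], "General improvements")
--     else:
--         phrase = f"{summary_map.get(best[0], '')}; also includes {summary_map.get(second[0], '').lower()}"
--     return phrase.rstrip(".") + "."
-- ===== Notes on version B (the rewrite author's own statement) =====
-- stated objective: alternative
-- what changed: Replaces building a counts dict plus a stable reverse sort with a single linear pass that tracks only the best and second-best nonempty sections (strict '>' reproduces the stable reverse-sort tie-break).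
import Mathlib
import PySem

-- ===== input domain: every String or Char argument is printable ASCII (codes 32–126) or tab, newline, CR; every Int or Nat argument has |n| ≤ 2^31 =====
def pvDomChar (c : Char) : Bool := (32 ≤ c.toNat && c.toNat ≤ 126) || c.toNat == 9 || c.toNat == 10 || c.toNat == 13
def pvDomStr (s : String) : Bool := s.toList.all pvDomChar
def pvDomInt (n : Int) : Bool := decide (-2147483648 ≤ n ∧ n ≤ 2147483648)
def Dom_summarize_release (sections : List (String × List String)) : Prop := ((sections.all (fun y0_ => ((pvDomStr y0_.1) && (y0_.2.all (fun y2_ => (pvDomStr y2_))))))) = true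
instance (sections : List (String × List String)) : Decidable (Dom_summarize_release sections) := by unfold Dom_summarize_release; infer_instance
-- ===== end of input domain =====

-- B replaces A's counts-dict + stable reverse sort by one linear pass keeping only the
-- top-two nonempty sections (strict '>' reproduces the stable tie-break); same output.

-- shared helpers (the identical summary_map / string formatting of both Pythons)
def pvSummaryMap : PySem.Dict String String := PySem.Dict.ofList
  [("Added", "Introduces new features and functionality"),
   ("Fixed", "Fixes key issues and improves reliability"),
   ("Improved", "Enhances performance and user experience"),
   ("Internal", "Internal cleanup and dependency updates"),
   ("Other", "Minor maintenance and adjustments")]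

-- Python str '+' (exact; kernel-reducible, unlike String.append)
def pvCat (a b : String) : String := String.ofList (a.toList ++ b.toList)

-- phrase.rstrip(".") : drop trailing '.' characters (exact hand port)
def pvRstripDot (s : String) : String := String.ofList ((s.toList.reverse.dropWhile (fun c => c = '.')).reverse)

-- ===== PORT A =====
def summarize_release (sections : List (String × List String)) : String :=
  let d := PySem.Dict.ofList sections
  -- counts = {k: len(v) for k, v in sections.items() if v}
  let counts : PySem.Dict String Int :=
    d.items.foldl (fun c kv => if kv.2 = [] then c else c.insert kv.1 (kv.2.length : Int))
      PySem.Dict.empty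
  if counts.items = [] then "Maintenance-only release."
  else
    let top := PySem.List.sorted counts.items (fun x => x.2) true
    let main := (PySem.List.slice top none (some 2)).map (fun p => p.1)
    match main with
    | [m0] => pvCat (pvRstripDot (pvSummaryMap.getD m0 "General improvements")) "."
    | m0 :: m1 :: _ =>
        pvCat (pvRstripDot (pvCat (pvSummaryMap.getD m0 "")
          (pvCat "; also includes " (PySem.Str.lower (pvSummaryMap.getD m1 ""))))) "."
    | [] => ""  -- unreachable: counts is nonempty here

-- ===== PORT B =====
def summarize_release_alt (sections : List (String × List String)) : String :=
  let d := PySem.Dict.ofList sections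
  let bs :=
    d.items.foldl
      (fun (st : Option (String × Int) × Option (String × Int)) kv =>
        if kv.2 = [] then st         -- if not v: continue
        else
          let n : Int := kv.2.length
          match st with
          | (none, _) => (some (kv.1, n), none)               -- best, second = (k, n), best(=None)
          | (some b, none) =>
              if n > b.2 then (some (kv.1, n), some b)
              else (some b, some (kv.1, n))                   -- second is None
          | (some b, some s) =>
              if n > b.2 then (some (kv.1, n), some b)
              else if n > s.2 then (some b, some (kv.1, n))
              else (some b, some s))
      (none, none)
  match bs with
  | (none, _) => "Maintenance-only release."
  | (some b, none) => pvCat (pvRstripDot (pvSummaryMap.getD b.1 "General improvements")) "."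
  | (some b, some s) =>
      pvCat (pvRstripDot (pvCat (pvSummaryMap.getD b.1 "")
        (pvCat "; also includes " (PySem.Str.lower (pvSummaryMap.getD s.1 ""))))) "."

-- ===== PRECONDITION & SPEC =====
def Spec_summarize_release (sections : List (String × List String)) (out : String) : Prop := out = summarize_release_alt sections
instance (sections : List (String × List String)) (out : String) : Decidable (Spec_summarize_release sections out) := by unfold Spec_summarize_release; infer_instance

-- ===== CLAIM (what is proved, stated in full; the proofs are below) =====
def Claim_equal_summarize_release : Prop := ∀ (sections : List (String × List String)), Dom_summarize_release sections → Spec_summarize_release sections (summarize_release sections)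

-- ===== LEMMAS AND PROOFS =====

-- B's one-step update, as a function of the pair (head?, second?) of the sorted prefix
def pvStep2 (st : Option (String × Int) × Option (String × Int)) (x : String × Int) :
    Option (String × Int) × Option (String × Int) :=
  match st with
  | (none, _) => (some x, none)
  | (some b, none) => if x.2 > b.2 then (some x, some b) else (some b, some x)
  | (some b, some s) =>
      if x.2 > b.2 then (some x, some b)
      else if x.2 > s.2 then (some b, some x)
      else (some b, some s)

def pvTwo (l : List (String × Int)) : Option (String × Int) × Option (String × Int) :=
  (l.head?, l[1]?)

lemma pvStep2_insertBy (acc : List (String × Int)) (x : String × Int) :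
    pvStep2 (pvTwo acc) x
      = pvTwo (PySem.List.insertBy (fun a b => decide ((fun y : String × Int => y.2) b < (fun y : String × Int => y.2) a)) x acc) := by
  match acc with
  | [] => simp [pvTwo, pvStep2, PySem.List.insertBy]
  | [a] =>
      simp only [pvTwo, pvStep2, PySem.List.insertBy]
      by_cases h : a.2 < x.2 <;> simp [h, gt_iff_lt]
  | a :: b :: t =>
      simp only [pvTwo, pvStep2, PySem.List.insertBy]
      by_cases h1 : a.2 < x.2
      · simp [h1]
      · by_cases h2 : b.2 < x.2 <;> simp [h1, h2]

lemma pvFold_invariant (l : List (String × Int)) (acc : List (String × Int)) :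
    l.foldl pvStep2 (pvTwo acc)
      = pvTwo (l.foldl (fun acc x => PySem.List.insertBy (fun a b => decide ((fun y : String × Int => y.2) b < (fun y : String × Int => y.2) a)) x acc) acc) := by
  induction l generalizing acc with
  | nil => rfl
  | cons x rest ih =>
      simp only [List.foldl_cons, pvStep2_insertBy]
      exact ih _

-- B's scan computes the (head?, second?) of the stable reverse sort
lemma pvFold_eq_two_sorted (l : List (String × Int)) :
    l.foldl pvStep2 (none, none) = pvTwo (PySem.List.sorted l (fun x => x.2) true) := by
  rw [PySem.List.sorted_rev_eq_foldl_insertBy]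
  exact pvFold_invariant l []

-- A's counts-building fold, reduced to filter + map
lemma pvCounts_fold (l : List (String × List String)) (d : PySem.Dict String Int) :
    l.foldl (fun c kv => if kv.2 = [] then c else c.insert kv.1 (kv.2.length : Int)) d
      = (l.filter (fun kv => decide (kv.2 ≠ []))).foldl
          (fun c kv => c.insert kv.1 (kv.2.length : Int)) d := by
  induction l generalizing d with
  | nil => rfl
  | cons kv rest ih =>
      by_cases h : kv.2 = [] <;> simp [h, ih]

-- B's fold over items, reduced to pvStep2 over the filtered, mapped list
lemma pvBFold (l : List (String × List String))
    (st : Option (String × Int) × Option (String × Int)) :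
    l.foldl
      (fun st kv =>
        if kv.2 = [] then st
        else
          let n : Int := kv.2.length
          match st with
          | (none, _) => (some (kv.1, n), none)
          | (some b, none) =>
              if n > b.2 then (some (kv.1, n), some b)
              else (some b, some (kv.1, n))
          | (some b, some s) =>
              if n > b.2 then (some (kv.1, n), some b)
              else if n > s.2 then (some b, some (kv.1, n))
              else (some b, some s)) st
      = ((l.filter (fun kv => decide (kv.2 ≠ []))).map (fun kv => (kv.1, (kv.2.length : Int)))).foldl pvStep2 st := by
  induction l generalizing st with
  | nil => rfl
  | cons kv rest ih =>
      by_cases h : kv.2 = [] <;> simp [h, ih, pvStep2]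

-- the items of the counts dict are exactly the filtered, mapped items of the input dict
lemma pvCounts_items (sections : List (String × List String)) :
    ((PySem.Dict.ofList sections).items.foldl
        (fun c kv => if kv.2 = [] then c else c.insert kv.1 (kv.2.length : Int))
        PySem.Dict.empty).items
      = ((PySem.Dict.ofList sections).items.filter (fun kv => decide (kv.2 ≠ []))).map
          (fun kv => (kv.1, (kv.2.length : Int))) := by
  rw [pvCounts_fold]
  have hnodup : ((((PySem.Dict.ofList sections).items.filter (fun kv => decide (kv.2 ≠ [])))).map (fun kv => kv.1)).Nodup := by
    have h1 : ((PySem.Dict.ofList sections).items.map (fun kv => kv.1)).Nodup := by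
      have := PySem.Dict.nodup_keys_ofList (κ := String) (ν := List String) sections
      simpa [PySem.Dict.keys] using this
    exact List.Sublist.nodup
      (List.Sublist.map (fun kv : String × List String => kv.1)
        (List.filter_sublist (l := (PySem.Dict.ofList sections).items))) h1
  have := PySem.Dict.items_foldl_insert_fresh
      ((PySem.Dict.ofList sections).items.filter (fun kv => decide (kv.2 ≠ [])))
      (fun kv => kv.1) (fun kv => (kv.2.length : Int)) PySem.Dict.empty
      (fun a _ => by simp [PySem.Dict.contains_empty]) hnodup
  simpa [PySem.Dict.empty] using this

-- the whole tail of both programs, as a function of the filtered counts list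
lemma pvTail (L : List (String × Int)) :
    (if L = [] then "Maintenance-only release."
     else
       match (PySem.List.slice (PySem.List.sorted L (fun x => x.2) true) none (some 2)).map (fun p => p.1) with
       | [m0] => pvCat (pvRstripDot (pvSummaryMap.getD m0 "General improvements")) "."
       | m0 :: m1 :: _ =>
           pvCat (pvRstripDot (pvCat (pvSummaryMap.getD m0 "")
             (pvCat "; also includes " (PySem.Str.lower (pvSummaryMap.getD m1 ""))))) "."
       | [] => "")
    = (match L.foldl pvStep2 (none, none) with
       | (none, _) => "Maintenance-only release."
       | (some b, none) => pvCat (pvRstripDot (pvSummaryMap.getD b.1 "General improvements")) "."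
       | (some b, some s) =>
           pvCat (pvRstripDot (pvCat (pvSummaryMap.getD b.1 "")
             (pvCat "; also includes " (PySem.Str.lower (pvSummaryMap.getD s.1 ""))))) ".") := by
  rw [pvFold_eq_two_sorted]
  rcases hs : PySem.List.sorted L (fun x => x.2) true with _ | ⟨a, _ | ⟨b, t⟩⟩
  · have hnil := (PySem.List.sorted_eq_nil_iff (key := fun x : String × Int => x.2) (rev := true) L).mp hs
    subst hnil
    simp [pvTwo]
  · have hne : L ≠ [] := by
      intro hcon; subst hcon
      simp [PySem.List.sorted] at hs
    rw [if_neg hne]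
    simp [pvTwo, PySem.List.slice_to]
  · have hne : L ≠ [] := by
      intro hcon; subst hcon
      simp [PySem.List.sorted] at hs
    rw [if_neg hne]
    simp [pvTwo, PySem.List.slice_to]

-- ===== VERDICT (by name: the statement is the Claim_ definition above) =====
theorem summarize_release_spec : Claim_equal_summarize_release := by
  intro sections _
  unfold Spec_summarize_release
  simp only [summarize_release, summarize_release_alt]
  rw [pvCounts_items, pvBFold]
  exact pvTail _
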